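-- pv_equiv track=rewrite | github.com/longdaoduy/IAAIR | pipelines/retrievals/HybridRetrievalHandler.py | _inject_where_conditions
-- ===== SOURCE A (Python) =====
-- from typing import Dict, List, Optional
--
-- def _inject_where_conditions(cypher: str, conditions: List[str]) -> str:
--     """Inject WHERE conditions into a Cypher query.
--
--     Handles:
--     - Template already has WHERE → append conditions with AND
--     - Template has no WHERE → insert WHERE right after the first MATCH
--       (works even when OPTIONAL MATCH follows immediately)
--     """
--     if not conditions:
--         return cypher
--
--     condition_str = ' AND '.join(conditions)
--     lines = cypher.strip().split('\n')
--     new_lines = []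
--     injected = False
--     found_first_match = False
--
--     for i, line in enumerate(lines):
--         stripped = line.strip().upper()
--
--         # Case 1: Existing WHERE — append with AND
--         if not injected and stripped.startswith('WHERE'):
--             new_lines.append(line.rstrip() + ' AND ' + condition_str)
--             injected = True
--             continue
--
--         # Case 2: First non-OPTIONAL MATCH
--         if not injected and not found_first_match and stripped.startswith('MATCH') and not stripped.startswith(
--                 'OPTIONAL'):
--             found_first_match = True
--             new_lines.append(line)
--             # Look ahead: if next non-empty line is WHERE, let that handle it
--             next_idx = i + 1
--             while next_idx < len(lines) and not lines[next_idx].strip():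
--                 next_idx += 1
--             if next_idx < len(lines) and lines[next_idx].strip().upper().startswith('WHERE'):
--                 continue  # WHERE follows, will be handled next iteration
--             # Otherwise inject WHERE right after this MATCH line
--             new_lines.append('WHERE ' + condition_str)
--             injected = True
--             continue
--
--         new_lines.append(line)
--
--     # Fallback: add before the first RETURN/ORDER BY/LIMIT if still not injected
--     if not injected:
--         final_lines = []
--         for line in new_lines:
--             s = line.strip().upper()
--             if not injected and (s.startswith('RETURN') or s.startswith('ORDER') or s.startswith('LIMIT')):
--                 final_lines.append('WHERE ' + condition_str)
--                 injected = True
--             final_lines.append(line)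
--         new_lines = final_lines
--
--     return '\n'.join(new_lines)
-- ===== SOURCE B (Python) =====
-- from typing import List
--
-- def _inject_where_conditions(cypher: str, conditions: List[str]) -> str:
--     """Inject WHERE conditions into a Cypher query (index-first single targeted edit)."""
--     if not conditions:
--         return cypher
--
--     cond = ' AND '.join(conditions)
--     lines = cypher.strip().split('\n')
--
--     def su(l):
--         return l.strip().upper()
--
--     w = next((i for i, l in enumerate(lines) if su(l).startswith('WHERE')), None)
--     m = next((i for i, l in enumerate(lines)
--               if su(l).startswith('MATCH') and not su(l).startswith('OPTIONAL')), None)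
--
--     if w is not None and (m is None or w < m):
--         # a WHERE not governed by a later MATCH: append the conditions to it
--         lines[w] = lines[w].rstrip() + ' AND ' + cond
--     elif m is not None:
--         n = next((j for j in range(m + 1, len(lines)) if lines[j].strip()), None)
--         if n is not None and su(lines[n]).startswith('WHERE'):
--             lines[n] = lines[n].rstrip() + ' AND ' + cond
--         else:
--             lines.insert(m + 1, 'WHERE ' + cond)
--     else:
--         r = next((i for i, l in enumerate(lines)
--                   if su(l).startswith(('RETURN', 'ORDER', 'LIMIT'))), None)
--         if r is not None:
--             lines.insert(r, 'WHERE ' + cond)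
--
--     return '\n'.join(lines)
-- ===== Notes on version B (the rewrite author's own statement) =====
-- stated objective: simpler
-- what changed: Replaces A's stateful rebuild loop (injected/found_first_match flags, per-line append, plus a second fallback rebuild pass) by first locating the relevant line indices (first WHERE, first non-OPTIONAL MATCH, next non-empty line, first RETURN/ORDER/LIMIT) and then performing one targeted edit (in-place line update or a single insert) on the line list.
import Mathlib
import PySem

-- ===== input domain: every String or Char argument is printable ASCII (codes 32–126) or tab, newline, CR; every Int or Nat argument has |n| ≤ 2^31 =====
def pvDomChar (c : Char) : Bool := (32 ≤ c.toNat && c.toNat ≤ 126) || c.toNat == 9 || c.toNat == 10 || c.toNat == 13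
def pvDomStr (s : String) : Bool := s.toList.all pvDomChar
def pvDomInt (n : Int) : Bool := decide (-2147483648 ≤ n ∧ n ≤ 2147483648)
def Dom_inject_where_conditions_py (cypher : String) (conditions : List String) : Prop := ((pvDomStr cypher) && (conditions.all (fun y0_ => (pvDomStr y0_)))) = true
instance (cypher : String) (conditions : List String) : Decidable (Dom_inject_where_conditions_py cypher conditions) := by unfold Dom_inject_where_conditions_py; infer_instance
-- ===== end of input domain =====

-- B replaces A's stateful rebuild loop (injected/found_first_match flags plus a fallback
-- rebuild pass) by locating the relevant line indices first and making one targeted edit;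
-- objective: simpler (same asymptotic cost).

-- ===== PORT A =====
-- the `while next_idx < len(lines) and not lines[next_idx].strip()` look-ahead:
-- returns the next non-empty line among the lines after the current one, if any
def pvSkipEmptyA (rest : List String) : Option String :=
  match rest with
  | [] => none
  | l :: t => if PySem.Str.strip l = "" then pvSkipEmptyA t else some l

-- the main `for i, line in enumerate(lines)` loop; state = (new_lines, injected, found_first_match)
def pvLoopA (cond : String) : List String → Bool → Bool → (List String × Bool)
  | [], injected, _ => ([], injected)
  | line :: rest, injected, found =>
    let stripped := PySem.Str.upper (PySem.Str.strip line)
    if !injected && PySem.Str.startswith stripped "WHERE" then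
      let r := pvLoopA cond rest true found
      ((PySem.Str.rstrip line ++ " AND " ++ cond) :: r.1, r.2)
    else if !injected && !found && PySem.Str.startswith stripped "MATCH" &&
        !PySem.Str.startswith stripped "OPTIONAL" then
      match pvSkipEmptyA rest with
      | some nxt =>
        if PySem.Str.startswith (PySem.Str.upper (PySem.Str.strip nxt)) "WHERE" then
          let r := pvLoopA cond rest injected true
          (line :: r.1, r.2)
        else
          let r := pvLoopA cond rest true true
          (line :: ("WHERE " ++ cond) :: r.1, r.2)
      | none =>
        let r := pvLoopA cond rest true true
        (line :: ("WHERE " ++ cond) :: r.1, r.2)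
    else
      let r := pvLoopA cond rest injected found
      (line :: r.1, r.2)

-- the fallback `for line in new_lines` loop
def pvFallbackA (cond : String) : List String → Bool → List String
  | [], _ => []
  | l :: t, injected =>
    let s := PySem.Str.upper (PySem.Str.strip l)
    if !injected && (PySem.Str.startswith s "RETURN" || PySem.Str.startswith s "ORDER" ||
        PySem.Str.startswith s "LIMIT") then
      ("WHERE " ++ cond) :: l :: pvFallbackA cond t true
    else
      l :: pvFallbackA cond t injected

def inject_where_conditions_py (cypher : String) (conditions : List String) : String :=
  if conditions = [] then cypher
  else
    let cond := PySem.Str.join " AND " conditions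
    let lines := (PySem.Str.split? (PySem.Str.strip cypher) "\n").getD []
    let r := pvLoopA cond lines false false
    let newLines := if r.2 then r.1 else pvFallbackA cond r.1 false
    PySem.Str.join "\n" newLines

-- ===== PORT B =====
-- Source B's local helper su(l) = l.strip().upper()
def pvSU (l : String) : String := PySem.Str.upper (PySem.Str.strip l)

-- the `elif m is not None` branch of Source B: edit after the MATCH line at index mi
def pvMatchEdit (cond : String) (lines : List String) (mi : Nat) : List String :=
  match (lines.drop (mi + 1)).findIdx? (fun l => !(PySem.Str.strip l == "")) with
  | some k =>
    let n := mi + 1 + k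
    if PySem.Str.startswith (pvSU (lines.getD n "")) "WHERE" then
      lines.set n (PySem.Str.rstrip (lines.getD n "") ++ " AND " ++ cond)
    else
      lines.take (mi + 1) ++ ("WHERE " ++ cond) :: lines.drop (mi + 1)
  | none => lines.take (mi + 1) ++ ("WHERE " ++ cond) :: lines.drop (mi + 1)

def inject_where_conditions_py_alt (cypher : String) (conditions : List String) : String :=
  if conditions = [] then cypher
  else
    let cond := PySem.Str.join " AND " conditions
    let lines := (PySem.Str.split? (PySem.Str.strip cypher) "\n").getD []
    let w := lines.findIdx? (fun l => PySem.Str.startswith (pvSU l) "WHERE")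
    let m := lines.findIdx? (fun l => PySem.Str.startswith (pvSU l) "MATCH" &&
               !PySem.Str.startswith (pvSU l) "OPTIONAL")
    let lines' :=
      match w, m with
      | some wi, none =>
          lines.set wi (PySem.Str.rstrip (lines.getD wi "") ++ " AND " ++ cond)
      | some wi, some mi =>
          if wi < mi then
            lines.set wi (PySem.Str.rstrip (lines.getD wi "") ++ " AND " ++ cond)
          else pvMatchEdit cond lines mi
      | none, some mi => pvMatchEdit cond lines mi
      | none, none =>
          match lines.findIdx? (fun l => PySem.Str.startswith (pvSU l) "RETURN" ||
                  PySem.Str.startswith (pvSU l) "ORDER" ||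
                  PySem.Str.startswith (pvSU l) "LIMIT") with
          | some ri => lines.take ri ++ ("WHERE " ++ cond) :: lines.drop ri
          | none => lines
    PySem.Str.join "\n" lines'

-- ===== PRECONDITION & SPEC =====
def Spec_inject_where_conditions_py (cypher : String) (conditions : List String) (out : String) : Prop := out = inject_where_conditions_py_alt cypher conditions
instance (cypher : String) (conditions : List String) (out : String) : Decidable (Spec_inject_where_conditions_py cypher conditions out) := by unfold Spec_inject_where_conditions_py; infer_instance

-- ===== CLAIM (what is proved, stated in full; the proofs are below) =====
def Claim_equal_inject_where_conditions_py : Prop := ∀ (cypher : String) (conditions : List String), Dom_inject_where_conditions_py cypher conditions → Spec_inject_where_conditions_py cypher conditions (inject_where_conditions_py cypher conditions)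

-- ===== LEMMAS AND PROOFS =====

-- a string cannot start with both "WHERE" and "MATCH"
lemma pv_where_not_match (s : String) (h : PySem.Str.startswith s "WHERE" = true) :
    PySem.Str.startswith s "MATCH" = false := by
  by_contra hm
  rw [Bool.not_eq_false] at hm
  rw [PySem.Str.startswith_eq, PySem.Chars.startswith_iff] at h hm
  obtain ⟨t1, h1⟩ := h
  obtain ⟨t2, h2⟩ := hm
  have h3 := h1.trans h2.symm
  simp at h3

-- an empty-stripping line is not a WHERE line
lemma pv_empty_not_where (l : String) (h : PySem.Str.strip l = "") :
    PySem.Str.startswith (pvSU l) "WHERE" = false := by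
  unfold pvSU
  rw [h]
  decide

-- once injected, the loop copies the remaining lines unchanged
lemma pvLoopA_injected (cond : String) (xs : List String) (found : Bool) :
    pvLoopA cond xs true found = (xs, true) := by
  induction xs generalizing found with
  | nil => simp [pvLoopA]
  | cons l t ih => simp [pvLoopA, ih]

-- with found_first_match set, only case 1 is live: the loop edits the first WHERE line
lemma pvLoopA_found (cond : String) (xs : List String) :
    pvLoopA cond xs false true =
      match xs.findIdx? (fun l => PySem.Str.startswith (pvSU l) "WHERE") with
      | some i => (xs.set i (PySem.Str.rstrip (xs.getD i "") ++ " AND " ++ cond), true)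
      | none => (xs, false) := by
  induction xs with
  | nil => simp [pvLoopA]
  | cons l t ih =>
    rw [List.findIdx?_cons]
    simp only [pvLoopA, Bool.not_false, Bool.not_true, Bool.true_and, Bool.false_and,
      Bool.and_false]
    simp only [pvSU]
    by_cases hW : PySem.Str.startswith (PySem.Str.upper (PySem.Str.strip l)) "WHERE" = true
    · simp only [hW, reduceIte, pvLoopA_injected, List.set_cons_zero, List.getD_cons_zero]
    · rw [Bool.not_eq_true] at hW
      simp only [hW, reduceIte, Bool.false_eq_true, ih]
      simp only [pvSU]
      cases hf : List.findIdx?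
          (fun l => PySem.Str.startswith (PySem.Str.upper (PySem.Str.strip l)) "WHERE") t with
      | none => simp
      | some k => simp [List.getD_cons_succ]

-- the look-ahead agrees with B's index search for a non-empty line
lemma pvSkipEmptyA_none (t : List String)
    (h : t.findIdx? (fun l => !(PySem.Str.strip l == "")) = none) :
    pvSkipEmptyA t = none := by
  induction t with
  | nil => rfl
  | cons l t ih =>
    rw [List.findIdx?_cons] at h
    by_cases he : PySem.Str.strip l = ""
    · have hb : (!(PySem.Str.strip l == "")) = false := by simp [he]
      simp only [hb, Bool.false_eq_true, reduceIte, Option.map_eq_none_iff] at h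
      simp [pvSkipEmptyA, he, ih h]
    · have hb : (!(PySem.Str.strip l == "")) = true := by simp [he]
      simp only [hb, reduceIte] at h
      exact absurd h (by simp)

lemma pvSkipEmptyA_some (t : List String) (k : Nat)
    (h : t.findIdx? (fun l => !(PySem.Str.strip l == "")) = some k) :
    pvSkipEmptyA t = some (t.getD k "") := by
  induction t generalizing k with
  | nil => simp at h
  | cons l t ih =>
    rw [List.findIdx?_cons] at h
    by_cases he : PySem.Str.strip l = ""
    · have hb : (!(PySem.Str.strip l == "")) = false := by simp [he]
      simp only [hb, Bool.false_eq_true, reduceIte, Option.map_eq_some_iff] at h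
      obtain ⟨k', hk', rfl⟩ := h
      simp [pvSkipEmptyA, he, ih k' hk']
    · have hb : (!(PySem.Str.strip l == "")) = true := by simp [he]
      simp only [hb, reduceIte, Option.some.injEq] at h
      subst h
      simp [pvSkipEmptyA, he]

-- all lines empty ⇒ there is no WHERE line and no MATCH line
lemma pv_allEmpty_no_where (t : List String)
    (h : t.findIdx? (fun l => !(PySem.Str.strip l == "")) = none) :
    t.findIdx? (fun l => PySem.Str.startswith (pvSU l) "WHERE") = none := by
  rw [List.findIdx?_eq_none_iff] at h ⊢
  intro x hx
  have := h x hx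
  simp at this
  exact pv_empty_not_where x this

-- if the first non-empty line is a WHERE line, it is the first WHERE line
lemma pv_first_nonempty_where (t : List String) (k : Nat)
    (h : t.findIdx? (fun l => !(PySem.Str.strip l == "")) = some k)
    (hw : PySem.Str.startswith (pvSU (t.getD k "")) "WHERE" = true) :
    t.findIdx? (fun l => PySem.Str.startswith (pvSU l) "WHERE") = some k := by
  induction t generalizing k with
  | nil => simp at h
  | cons l t ih =>
    rw [List.findIdx?_cons] at h ⊢
    by_cases he : PySem.Str.strip l = ""
    · have hb : (!(PySem.Str.strip l == "")) = false := by simp [he]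
      simp only [hb, Bool.false_eq_true, reduceIte, Option.map_eq_some_iff] at h
      obtain ⟨k', hk', rfl⟩ := h
      simp only [List.getD_cons_succ] at hw
      simp only [pv_empty_not_where l he, Bool.false_eq_true, reduceIte,
        ih k' hk' hw, Option.map_some]
    · have hb : (!(PySem.Str.strip l == "")) = true := by simp [he]
      simp only [hb, reduceIte, Option.some.injEq] at h
      subst h
      simp only [List.getD_cons_zero] at hw
      simp only [hw, reduceIte]

-- shifting pvMatchEdit under a cons
lemma pvMatchEdit_cons (cond : String) (l : String) (t : List String) (mi : Nat) :
    pvMatchEdit cond (l :: t) (mi + 1) = l :: pvMatchEdit cond t mi := by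
  unfold pvMatchEdit
  rw [List.drop_succ_cons]
  cases hf : (t.drop (mi + 1)).findIdx? (fun l => !(PySem.Str.strip l == "")) with
  | none => simp
  | some k =>
    have hn : mi + 1 + 1 + k = (mi + 1 + k) + 1 := by omega
    simp only [hn, List.getD_cons_succ, List.set_cons_succ, List.take_succ_cons]
    split <;> simp

-- the fallback pass leaves the lines alone once injected
lemma pvFallbackA_true (cond : String) (t : List String) :
    pvFallbackA cond t true = t := by
  induction t with
  | nil => rfl
  | cons l t ih => simp [pvFallbackA, ih]

-- the fallback pass is B's RETURN/ORDER/LIMIT edit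
lemma pvFallbackA_eq (cond : String) (t : List String) :
    pvFallbackA cond t false =
      match t.findIdx? (fun l => PySem.Str.startswith (pvSU l) "RETURN" ||
              PySem.Str.startswith (pvSU l) "ORDER" ||
              PySem.Str.startswith (pvSU l) "LIMIT") with
      | some ri => t.take ri ++ ("WHERE " ++ cond) :: t.drop ri
      | none => t := by
  induction t with
  | nil => rfl
  | cons l t ih =>
    rw [List.findIdx?_cons]
    simp only [pvFallbackA, Bool.not_false, Bool.true_and]
    simp only [pvSU]
    by_cases hR : (PySem.Str.startswith (PySem.Str.upper (PySem.Str.strip l)) "RETURN" ||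
        PySem.Str.startswith (PySem.Str.upper (PySem.Str.strip l)) "ORDER" ||
        PySem.Str.startswith (PySem.Str.upper (PySem.Str.strip l)) "LIMIT") = true
    · simp only [hR, reduceIte, pvFallbackA_true, List.take_zero, List.drop_zero,
        List.nil_append]
    · rw [Bool.not_eq_true] at hR
      simp only [hR, reduceIte, Bool.false_eq_true, ih]
      simp only [pvSU]
      cases hf : List.findIdx?
          (fun l => PySem.Str.startswith (PySem.Str.upper (PySem.Str.strip l)) "RETURN" ||
            PySem.Str.startswith (PySem.Str.upper (PySem.Str.strip l)) "ORDER" ||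
            PySem.Str.startswith (PySem.Str.upper (PySem.Str.strip l)) "LIMIT") t with
      | none => simp
      | some k => simp [List.take_succ_cons, List.drop_succ_cons]

-- the main loop, characterised by the indices B computes
def pvBMain (cond : String) (t : List String) : List String × Bool :=
  match t.findIdx? (fun l => PySem.Str.startswith (pvSU l) "WHERE"),
        t.findIdx? (fun l => PySem.Str.startswith (pvSU l) "MATCH" &&
          !PySem.Str.startswith (pvSU l) "OPTIONAL") with
  | some wi, none => (t.set wi (PySem.Str.rstrip (t.getD wi "") ++ " AND " ++ cond), true)
  | some wi, some mi =>
      if wi < mi then (t.set wi (PySem.Str.rstrip (t.getD wi "") ++ " AND " ++ cond), true)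
      else (pvMatchEdit cond t mi, true)
  | none, some mi => (pvMatchEdit cond t mi, true)
  | none, none => (t, false)

lemma pvLoopA_eq_pvBMain (cond : String) (t : List String) :
    pvLoopA cond t false false = pvBMain cond t := by
  induction t with
  | nil => simp [pvLoopA, pvBMain]
  | cons l t ih =>
    unfold pvBMain
    rw [List.findIdx?_cons, List.findIdx?_cons]
    simp only [pvLoopA, Bool.not_false, Bool.true_and]
    simp only [pvSU]
    by_cases hW : PySem.Str.startswith (PySem.Str.upper (PySem.Str.strip l)) "WHERE" = true
    · -- Case 1 fires: first WHERE line is line 0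
      have hM : PySem.Str.startswith (PySem.Str.upper (PySem.Str.strip l)) "MATCH" = false :=
        pv_where_not_match _ hW
      simp only [hW, hM, reduceIte, Bool.false_and, Bool.false_eq_true, pvLoopA_injected]
      cases hm : List.findIdx?
          (fun l => PySem.Str.startswith (PySem.Str.upper (PySem.Str.strip l)) "MATCH" &&
            !PySem.Str.startswith (PySem.Str.upper (PySem.Str.strip l)) "OPTIONAL") t with
      | none => simp
      | some mi => simp
    · rw [Bool.not_eq_true] at hW
      simp only [hW, reduceIte, Bool.false_eq_true]
      by_cases hM : (PySem.Str.startswith (PySem.Str.upper (PySem.Str.strip l)) "MATCH" &&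
          !PySem.Str.startswith (PySem.Str.upper (PySem.Str.strip l)) "OPTIONAL") = true
      · -- Case 2 fires at line 0
        simp only [hM, reduceIte]
        cases hf : t.findIdx? (fun l => !(PySem.Str.strip l == "")) with
        | none =>
          -- everything after the MATCH is blank: insert WHERE after it
          rw [pvSkipEmptyA_none t hf, pvLoopA_injected]
          have h2 := pv_allEmpty_no_where t hf
          simp only [pvSU] at h2
          rw [h2]
          simp only [Option.map_none]
          simp only [pvMatchEdit, Nat.zero_add, List.drop_succ_cons, List.drop_zero]
          rw [hf]
          simp
        | some k =>
          have hcomm : 1 + k = k + 1 := Nat.add_comm 1 k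
          by_cases hw2 : PySem.Str.startswith (pvSU (t.getD k "")) "WHERE" = true
          · -- next non-empty line is a WHERE: it gets the AND appended
            rw [pvSkipEmptyA_some t k hf]
            have h1 := pv_first_nonempty_where t k hf hw2
            simp only [pvSU] at hw2 h1
            simp only [hw2, reduceIte, pvLoopA_found]
            simp only [pvSU]
            rw [h1]
            simp only [Option.map_some]
            have : ¬ (k + 1 < 0) := by omega
            simp only [this, reduceIte]
            simp only [pvMatchEdit, Nat.zero_add, List.drop_succ_cons, List.drop_zero]
            rw [hf]
            simp only [pvSU, hcomm, List.getD_cons_succ, List.set_cons_succ, hw2, reduceIte]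
          · -- next non-empty line is not a WHERE: insert right after the MATCH
            rw [Bool.not_eq_true] at hw2
            rw [pvSkipEmptyA_some t k hf]
            simp only [pvSU] at hw2
            simp only [hw2, reduceIte, Bool.false_eq_true, pvLoopA_injected]
            cases hwt : List.findIdx?
                (fun l => PySem.Str.startswith (PySem.Str.upper (PySem.Str.strip l)) "WHERE") t with
            | none =>
              simp only [Option.map_none]
              simp only [pvMatchEdit, Nat.zero_add, List.drop_succ_cons, List.drop_zero]
              rw [hf]
              simp only [pvSU, hcomm, List.getD_cons_succ, hw2, Bool.false_eq_true, reduceIte]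
              simp
            | some wi =>
              have : ¬ (wi + 1 < 0) := by omega
              simp only [Option.map_some, this, reduceIte]
              simp only [pvMatchEdit, Nat.zero_add, List.drop_succ_cons, List.drop_zero]
              rw [hf]
              simp only [pvSU, hcomm, List.getD_cons_succ, hw2, Bool.false_eq_true, reduceIte]
              simp
      · -- neither a WHERE nor a MATCH line: everything shifts by one
        rw [Bool.not_eq_true] at hM
        simp only [hM, reduceIte, Bool.false_eq_true, ih]
        unfold pvBMain
        simp only [pvSU]
        cases hwt : List.findIdx?
            (fun l => PySem.Str.startswith (PySem.Str.upper (PySem.Str.strip l)) "WHERE") t with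
        | none =>
          cases hmt : List.findIdx?
              (fun l => PySem.Str.startswith (PySem.Str.upper (PySem.Str.strip l)) "MATCH" &&
                !PySem.Str.startswith (PySem.Str.upper (PySem.Str.strip l)) "OPTIONAL") t with
          | none => simp
          | some mi => simp [pvMatchEdit_cons]
        | some wi =>
          cases hmt : List.findIdx?
              (fun l => PySem.Str.startswith (PySem.Str.upper (PySem.Str.strip l)) "MATCH" &&
                !PySem.Str.startswith (PySem.Str.upper (PySem.Str.strip l)) "OPTIONAL") t with
          | none => simp [List.set_cons_succ]
          | some mi =>
            simp only [Option.map_some]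
            by_cases hlt : wi < mi
            · have hlt' : wi + 1 < mi + 1 := by omega
              simp only [hlt, hlt', reduceIte, List.getD_cons_succ, List.set_cons_succ]
            · have hlt' : ¬ (wi + 1 < mi + 1) := by omega
              simp only [hlt, hlt', reduceIte, pvMatchEdit_cons]

-- ===== VERDICT (by name: the statement is the Claim_ definition above) =====
theorem inject_where_conditions_py_spec : Claim_equal_inject_where_conditions_py := by
  intro cypher conditions _
  show inject_where_conditions_py cypher conditions = inject_where_conditions_py_alt cypher conditions
  unfold inject_where_conditions_py inject_where_conditions_py_alt
  by_cases hc : conditions = []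
  · rw [if_pos hc, if_pos hc]
  · rw [if_neg hc, if_neg hc]
    dsimp only
    rw [pvLoopA_eq_pvBMain]
    unfold pvBMain
    cases hw : (((PySem.Str.split? (PySem.Str.strip cypher) "\n").getD []).findIdx?
        (fun l => PySem.Str.startswith (pvSU l) "WHERE")) with
    | none =>
      cases hm : (((PySem.Str.split? (PySem.Str.strip cypher) "\n").getD []).findIdx?
          (fun l => PySem.Str.startswith (pvSU l) "MATCH" &&
            !PySem.Str.startswith (pvSU l) "OPTIONAL")) with
      | none => simp [pvFallbackA_eq]
      | some mi => simp
    | some wi =>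
      cases hm : (((PySem.Str.split? (PySem.Str.strip cypher) "\n").getD []).findIdx?
          (fun l => PySem.Str.startswith (pvSU l) "MATCH" &&
            !PySem.Str.startswith (pvSU l) "OPTIONAL")) with
      | none => simp
      | some mi =>
        by_cases hlt : wi < mi
        · simp [hlt]
        · simp [hlt]
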